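-- pv_equiv track=rewrite | github.com/adiabhiraj195/AIBI | backend/app/utils/validators.py | validate_csv_structure
-- ===== SOURCE A (Python) =====
-- from typing import List
--
-- def validate_csv_structure(data: List[dict]) -> bool:
--     """Validate CSV data structure"""
--     if not data:
--         return False
--
--     # Check if all rows have the same keys (columns)
--     if len(data) > 1:
--         first_row_keys = set(data[0].keys())
--         for row in data[1:]:
--             if set(row.keys()) != first_row_keys:
--                 return False
--
--     return True
-- ===== SOURCE B (Python) =====
-- def validate_csv_structure(data):
--     """Validate CSV data structure"""
--     if not data:
--         return False
--     signatures = {tuple(sorted(row)) for row in data}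
--     return len(signatures) == 1
-- ===== Notes on version B (the rewrite author's own statement) =====
-- stated objective: simpler
-- what changed: Instead of anchoring on the first row and comparing every later row's key set to it with an early-return loop, B builds the set of sorted-key signatures of all rows in one comprehension and returns whether its cardinality is 1.
import Mathlib
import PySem

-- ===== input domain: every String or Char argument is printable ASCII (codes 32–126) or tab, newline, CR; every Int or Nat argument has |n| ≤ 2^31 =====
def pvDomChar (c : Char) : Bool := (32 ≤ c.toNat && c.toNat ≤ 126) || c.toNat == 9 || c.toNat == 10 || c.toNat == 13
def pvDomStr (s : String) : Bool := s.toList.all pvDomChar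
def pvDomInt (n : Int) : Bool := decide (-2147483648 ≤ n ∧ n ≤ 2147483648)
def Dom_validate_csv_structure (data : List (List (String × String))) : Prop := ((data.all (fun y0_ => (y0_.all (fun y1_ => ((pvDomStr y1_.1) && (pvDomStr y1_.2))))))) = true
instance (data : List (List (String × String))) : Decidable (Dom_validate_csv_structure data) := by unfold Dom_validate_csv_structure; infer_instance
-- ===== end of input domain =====

-- B replaces A's anchor-row comparison loop by a one-pass set of sorted-key signatures
-- whose cardinality decides uniformity (objective: simpler).

-- ===== PORT A =====
-- the keys of a dict modelled as an association list: first occurrences of the key column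
def vcsKeys (row : List (String × String)) : PySem.Set String :=
  PySem.Set.ofList (row.map Prod.fst)

-- 'for row in data[1:]: if set(row.keys()) != first_row_keys: return False'
def vcsLoop (rows : List (List (String × String))) (frk : PySem.Set String) : Bool :=
  match rows with
  | [] => true
  | row :: rest =>
    if PySem.Set.equal (vcsKeys row) frk then vcsLoop rest frk else false

def validate_csv_structure (data : List (List (String × String))) : Bool :=
  if data.isEmpty then false
  else if data.length > 1 then
    vcsLoop (data.drop 1) (vcsKeys (data.headD []))
  else true

-- ===== PORT B =====
-- tuple(sorted(row)) : the sorted tuple of the dict's (distinct) keys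
def vcsSig (row : List (String × String)) : List String :=
  PySem.List.sorted (PySem.Set.ofList (row.map Prod.fst)) (fun x => x) false

def validate_csv_structure_alt (data : List (List (String × String))) : Bool :=
  if data.isEmpty then false
  else
    let signatures : PySem.Set (List String) := PySem.Set.ofList (data.map vcsSig)
    signatures.length == 1

-- ===== PRECONDITION & SPEC =====
def Spec_validate_csv_structure (data : List (List (String × String))) (out : Bool) : Prop := out = validate_csv_structure_alt data
instance (data : List (List (String × String))) (out : Bool) : Decidable (Spec_validate_csv_structure data out) := by unfold Spec_validate_csv_structure; infer_instance

-- ===== CLAIM (what is proved, stated in full; the proofs are below) =====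
def Claim_equal_validate_csv_structure : Prop := ∀ (data : List (List (String × String))), Dom_validate_csv_structure data → Spec_validate_csv_structure data (validate_csv_structure data)

-- ===== LEMMAS AND PROOFS =====

-- two key sets are equal as sets iff their sorted signatures coincide
theorem vcsSig_eq_iff (a b : List (String × String)) :
    vcsSig a = vcsSig b ↔ PySem.Set.equal (vcsKeys a) (vcsKeys b) = true := by
  unfold vcsSig vcsKeys
  rw [PySem.List.sorted_id_eq_sorted_id_iff_perm, PySem.Set.equal_iff,
    List.perm_ext_iff_of_nodup (PySem.Set.nodup_ofList _) (PySem.Set.nodup_ofList _)]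

-- a set built from x :: l has one element iff every element of l equals x
theorem ofList_len_one_iff {α : Type} [BEq α] [LawfulBEq α] (x : α) (l : List α) :
    (PySem.Set.ofList (x :: l)).length = 1 ↔ ∀ y ∈ l, y = x := by
  constructor
  · intro h y hy
    obtain ⟨z, hz⟩ : ∃ z, PySem.Set.ofList (x :: l) = [z] := by
      cases hs : PySem.Set.ofList (x :: l) with
      | nil => simp [hs] at h
      | cons z t => cases t with
        | nil => exact ⟨z, rfl⟩
        | cons _ _ => simp [hs] at h
    have hx : x ∈ PySem.Set.ofList (x :: l) := by
      rw [PySem.Set.mem_ofList]; exact List.mem_cons_self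
    have hyy : y ∈ PySem.Set.ofList (x :: l) := by
      rw [PySem.Set.mem_ofList]; exact List.mem_cons_of_mem _ hy
    rw [hz] at hx hyy
    simp at hx hyy
    exact hyy.trans hx.symm
  · intro h
    have : ∀ m : List α, (∀ y ∈ m, y = x) → PySem.Set.ofList (x :: m) = [x] := by
      intro m hm
      induction m with
      | nil => rfl
      | cons z t ih =>
        have hz : z = x := hm z List.mem_cons_self
        have : PySem.Set.ofList (x :: z :: t) = PySem.Set.ofList (x :: t) := by
          subst hz
          simp [PySem.Set.ofList, PySem.Set.add, PySem.Set.contains]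
        rw [this]
        exact ih (fun y hy => hm y (List.mem_cons_of_mem _ hy))
    rw [this l h]
    rfl

-- A's loop returns true iff every remaining row's key set equals the anchor's
theorem vcsLoop_iff (rows : List (List (String × String))) (frk : PySem.Set String) :
    vcsLoop rows frk = true ↔ ∀ row ∈ rows, PySem.Set.equal (vcsKeys row) frk = true := by
  induction rows with
  | nil => simp [vcsLoop]
  | cons r t ih =>
    have e : vcsLoop (r :: t) frk
        = if PySem.Set.equal (vcsKeys r) frk then vcsLoop t frk else false := rfl
    rw [e]
    by_cases h : PySem.Set.equal (vcsKeys r) frk = true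
    · rw [if_pos h, ih]
      constructor
      · intro ha row hrow
        rcases List.mem_cons.1 hrow with rfl | hm
        · exact h
        · exact ha row hm
      · intro ha row hm
        exact ha row (List.mem_cons_of_mem _ hm)
    · rw [if_neg h]
      constructor
      · intro hc
        exact absurd hc Bool.false_ne_true
      · intro ha
        exact absurd (ha r List.mem_cons_self) h

-- ===== VERDICT (by name: the statement is the Claim_ definition above) =====
theorem validate_csv_structure_spec : Claim_equal_validate_csv_structure := by
  intro data _
  unfold Spec_validate_csv_structure
  cases data with
  | nil => rfl
  | cons first rest =>
    have hA : validate_csv_structure (first :: rest) = vcsLoop rest (vcsKeys first) := by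
      cases rest with
      | nil => rfl
      | cons r t =>
        have hlen : (first :: r :: t).length > 1 := by simp
        simp only [validate_csv_structure, List.isEmpty_cons, Bool.false_eq_true, if_false,
          if_pos hlen, List.drop_one, List.tail_cons, List.headD_cons]
    have hAlt : validate_csv_structure_alt (first :: rest)
        = ((PySem.Set.ofList (vcsSig first :: rest.map vcsSig)).length == 1) := rfl
    rw [hA, hAlt, Bool.eq_iff_iff, vcsLoop_iff, beq_iff_eq, ofList_len_one_iff]
    constructor
    · intro h s hs
      obtain ⟨row, hrow, rfl⟩ := List.mem_map.1 hs
      rw [vcsSig_eq_iff]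
      exact h row hrow
    · intro h row hrow
      rw [← vcsSig_eq_iff]
      exact h _ (List.mem_map_of_mem hrow)
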